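-- pv_equiv track=rewrite | github.com/blankbits/reup | polygon-time-series/lambda_invoke.py | get_date_symbol_dict
-- ===== SOURCE A (Python) =====
-- from typing import Dict, List
--
-- def get_date_symbol_dict(
--         s3_keys: List[str], s3_prefix: str) -> Dict[str, List[str]]:
--     s3_keys_sorted = s3_keys.copy()
--     s3_keys_sorted.sort()
--
--     date_symbol_dict: Dict[str, List[str]] = {}
--     for key in s3_keys_sorted:
--         date, symbol = key.replace(s3_prefix, '').split('/')[:2]
--         if date in date_symbol_dict:
--             if date_symbol_dict[date][-1] != symbol:
--                 date_symbol_dict[date].append(symbol)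
--         else:
--             date_symbol_dict[date] = [symbol]
--
--     return date_symbol_dict
-- ===== SOURCE B (Python) =====
-- def get_date_symbol_dict(s3_keys, s3_prefix):
--     # Collect every symbol per date in one grouping pass over the sorted keys,
--     # then strip adjacent duplicates per group when emitting the result dict.
--     groups = {}
--     for key in sorted(s3_keys):
--         date, symbol = key.replace(s3_prefix, '').split('/')[:2]
--         groups[date] = groups.get(date, []) + [symbol]
--     return {date: [s for prev, s in zip([None] + syms, syms) if prev != s]
--             for date, syms in groups.items()}
-- ===== Notes on version B (the rewrite author's own statement) =====
-- stated objective: alternative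
-- what changed: B replaces A's incremental dict build with a compare-against-last-element check at every append by a plain one-pass grouping of all symbols per date followed by an adjacent-duplicate-stripping emission pass over the groups.
import Mathlib
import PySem

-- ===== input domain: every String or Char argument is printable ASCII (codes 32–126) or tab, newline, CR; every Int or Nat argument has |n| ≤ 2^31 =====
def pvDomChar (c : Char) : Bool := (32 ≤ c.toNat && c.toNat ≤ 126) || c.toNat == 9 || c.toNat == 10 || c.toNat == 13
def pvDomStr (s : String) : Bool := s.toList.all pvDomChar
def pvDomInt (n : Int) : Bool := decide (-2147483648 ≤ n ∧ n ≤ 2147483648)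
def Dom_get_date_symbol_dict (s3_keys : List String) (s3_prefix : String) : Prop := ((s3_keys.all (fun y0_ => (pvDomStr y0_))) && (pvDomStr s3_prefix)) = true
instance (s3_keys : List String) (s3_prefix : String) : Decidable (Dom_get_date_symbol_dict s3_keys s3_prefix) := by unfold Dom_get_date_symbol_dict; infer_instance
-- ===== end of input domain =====

-- B groups ALL symbols per date in one pass and strips adjacent duplicates per group when
-- emitting the result, instead of A's check-the-last-element-at-each-append dict build
-- (objective: alternative decomposition, same cost; return value only, no mutation).

-- ===== PORT A =====
-- key.replace(s3_prefix, '').split('/')   (sep "/" ≠ "", so split? is some: .getD [] is exact)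
def pvParts (key s3_prefix : String) : List String :=
  (PySem.Str.split? (PySem.Str.replace key s3_prefix "") "/").getD []

-- A's loop body
def pvStepA (s3_prefix : String) (d : PySem.Dict String (List String)) (key : String) :
    PySem.Dict String (List String) :=
  match pvParts key s3_prefix with
  | date :: symbol :: _ =>
    if d.contains date then
      if PySem.List.pyGetD (d.getD date []) (-1) "" ≠ symbol then
        -- date_symbol_dict[date].append(symbol)
        d.insert date (d.getD date [] ++ [symbol])
      else d
    else d.insert date [symbol]
  | _ => d    -- fewer than 2 parts: Python raises ValueError here (excluded by Pre_)

def get_date_symbol_dict (s3_keys : List String) (s3_prefix : String) : List (String × List String) :=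
  -- sorted on the code-point lists = Python's string sort order (String's own LT is not kernel-reducible)
  let s3_keys_sorted := PySem.List.sorted s3_keys (fun x => x.toList) false
  (s3_keys_sorted.foldl (pvStepA s3_prefix) PySem.Dict.empty).items

-- ===== PORT B =====
-- [s for prev, s in zip([None] + syms, syms) if prev != s]
def pvDedupAdj (syms : List String) : List String :=
  ((((none : Option String) :: syms.map some).zip syms).filter (fun p => p.1 ≠ some p.2)).map (fun p => p.2)

-- B's loop body: groups[date] = groups.get(date, []) + [symbol]
def pvStepB (s3_prefix : String) (g : PySem.Dict String (List String)) (key : String) :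
    PySem.Dict String (List String) :=
  match pvParts key s3_prefix with
  | date :: symbol :: _ => g.insert date (g.getD date [] ++ [symbol])
  | _ => g    -- fewer than 2 parts: Python raises ValueError here (excluded by Pre_)

def get_date_symbol_dict_alt (s3_keys : List String) (s3_prefix : String) : List (String × List String) :=
  let groups := (PySem.List.sorted s3_keys (fun x => x.toList) false).foldl (pvStepB s3_prefix) PySem.Dict.empty
  -- the final dict comprehension: its keys are groups' (already unique) keys in order,
  -- so its items are exactly groups' item list mapped through pvDedupAdj
  groups.items.map (fun p => (p.1, pvDedupAdj p.2))

-- ===== PRECONDITION & SPEC =====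
-- Pre_ excludes exactly the keys on which Python's 2-element unpacking raises ValueError
-- (replace(prefix,'').split('/') yields fewer than 2 parts); both A and B raise there.
def Pre_get_date_symbol_dict (s3_keys : List String) (s3_prefix : String) : Prop :=
  ∀ key ∈ s3_keys, 2 ≤ (pvParts key s3_prefix).length
instance (s3_keys : List String) (s3_prefix : String) : Decidable (Pre_get_date_symbol_dict s3_keys s3_prefix) := by unfold Pre_get_date_symbol_dict; infer_instance

def pvWitness_get_date_symbol_dict : List String × String :=
  (["data/2020-01-02/MSFT/t.csv", "data/2020-01-02/AAPL/t.csv", "data/2020-01-03/AAPL/t.csv"], "data/")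

def Spec_get_date_symbol_dict (s3_keys : List String) (s3_prefix : String) (out : List (String × List String)) : Prop := out = get_date_symbol_dict_alt s3_keys s3_prefix
instance (s3_keys : List String) (s3_prefix : String) (out : List (String × List String)) : Decidable (Spec_get_date_symbol_dict s3_keys s3_prefix out) := by unfold Spec_get_date_symbol_dict; infer_instance

-- ===== CLAIM (what is proved, stated in full; the proofs are below) =====
def Claim_equal_get_date_symbol_dict : Prop := ∀ (s3_keys : List String) (s3_prefix : String), Dom_get_date_symbol_dict s3_keys s3_prefix → Pre_get_date_symbol_dict s3_keys s3_prefix → Spec_get_date_symbol_dict s3_keys s3_prefix (get_date_symbol_dict s3_keys s3_prefix)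

-- ===== LEMMAS AND PROOFS =====

-- the entry-wise transformation B applies when emitting
def pvMapF (p : String × List String) : String × List String := (p.1, pvDedupAdj p.2)

-- generalisation of pvDedupAdj with an arbitrary "previous" seed
def pvDAux (a : Option String) (xs : List String) : List String :=
  (((a :: xs.map some).zip xs).filter (fun p => p.1 ≠ some p.2)).map (fun p => p.2)

theorem pvDedupAdj_eq_dAux (xs : List String) : pvDedupAdj xs = pvDAux none xs := rfl

theorem pvDAux_cons (a : Option String) (x : String) (t : List String) :
    pvDAux a (x :: t) = (if a = some x then [] else [x]) ++ pvDAux (some x) t := by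
  simp only [pvDAux, List.map_cons, List.zip_cons_cons, List.filter_cons]
  split_ifs with h1 h2 h3 <;> simp_all

theorem pvDAux_append_singleton (xs : List String) (a : Option String) (s : String) :
    pvDAux a (xs ++ [s]) = pvDAux a xs ++ (if xs.getLast?.or a = some s then [] else [s]) := by
  induction xs generalizing a with
  | nil => rw [List.nil_append, pvDAux_cons]; simp [pvDAux]
  | cons x t ih =>
    rw [List.cons_append, pvDAux_cons, pvDAux_cons, ih (some x), List.append_assoc]
    rcases hgl : t.getLast? with _ | y <;> simp [List.getLast?_cons, hgl]

theorem pvDedupAdj_append_singleton (v : List String) (s : String) :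
    pvDedupAdj (v ++ [s]) = pvDedupAdj v ++ (if v.getLast? = some s then [] else [s]) := by
  simp [pvDedupAdj_eq_dAux, pvDAux_append_singleton]

theorem pvDedupAdj_singleton (s : String) : pvDedupAdj [s] = [s] := rfl

theorem pvDedupAdj_getLast? (v : List String) : (pvDedupAdj v).getLast? = v.getLast? := by
  induction v using List.reverseRecOn with
  | nil => rfl
  | append_singleton xs s ih =>
    rw [pvDedupAdj_append_singleton]
    split_ifs with h
    · simp [ih, h]
    · simp

theorem pvDedupAdj_ne_nil (v : List String) (h : v ≠ []) : pvDedupAdj v ≠ [] := by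
  intro hc
  have := pvDedupAdj_getLast? v
  rw [hc] at this
  exact h (List.getLast?_eq_none_iff.mp this.symm)

-- the invariant relating A's dict to B's dict
def pvRel (dA dB : PySem.Dict String (List String)) : Prop :=
  dA.items = dB.items.map pvMapF ∧ (∀ p ∈ dB.items, p.2 ≠ []) ∧ dB.keys.Nodup

theorem pvRel_keys {dA dB : PySem.Dict String (List String)} (h : pvRel dA dB) :
    dA.keys = dB.keys := by
  simp only [PySem.Dict.keys, h.1, List.map_map]
  rfl

theorem pvGet?_map_rel (l : List (String × List String)) (k : String) :
    (PySem.Dict.mk (l.map pvMapF)).get? k = ((PySem.Dict.mk l).get? k).map pvDedupAdj := by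
  induction l with
  | nil => rfl
  | cons p t ih =>
    rcases p with ⟨pk, pv⟩
    simp only [List.map_cons, pvMapF, PySem.Dict.get?_mk_cons]
    by_cases h : pk = k
    · simp [h]
    · simp [h, ih]

theorem pvRel_get? {dA dB : PySem.Dict String (List String)} (h : pvRel dA dB) (k : String) :
    dA.get? k = (dB.get? k).map pvDedupAdj := by
  have hA : dA = PySem.Dict.mk (dB.items.map pvMapF) := PySem.Dict.ext h.1
  rw [hA, pvGet?_map_rel]

theorem pvRel_step (s3_prefix : String) {dA dB : PySem.Dict String (List String)}
    (h : pvRel dA dB) (key : String) (hk : 2 ≤ (pvParts key s3_prefix).length) :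
    pvRel (pvStepA s3_prefix dA key) (pvStepB s3_prefix dB key) := by
  obtain ⟨hitems, hne, hnd⟩ := h
  rcases hp : pvParts key s3_prefix with _ | ⟨date, _ | ⟨symbol, rest⟩⟩
  · rw [hp] at hk; simp at hk
  · rw [hp] at hk; simp at hk
  simp only [pvStepA, pvStepB, hp]
  have hcont : dA.contains date = dB.contains date := by
    rw [PySem.Dict.contains_eq_decide_mem_keys, PySem.Dict.contains_eq_decide_mem_keys,
      pvRel_keys ⟨hitems, hne, hnd⟩]
  by_cases hc : dB.contains date = true
  · -- date already present in both dicts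
    obtain ⟨vB, hvB⟩ : ∃ v, dB.get? date = some v := by
      rcases hg : dB.get? date with _ | v
      · rw [PySem.Dict.contains_eq_isSome_get?, hg] at hc; simp at hc
      · exact ⟨v, rfl⟩
    have hvBne : vB ≠ [] := hne (date, vB) (PySem.Dict.mem_items_of_get?_eq_some _ hvB)
    have hgB : dB.getD date [] = vB := PySem.Dict.getD_of_get?_eq_some _ _ hvB
    have hgA : dA.getD date [] = pvDedupAdj vB := by
      rw [PySem.Dict.getD_eq_get?_getD, pvRel_get? ⟨hitems, hne, hnd⟩, hvB]; rfl
    have hdne : pvDedupAdj vB ≠ [] := pvDedupAdj_ne_nil vB hvBne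
    have hcA : dA.contains date = true := by rw [hcont]; exact hc
    have hlast : PySem.List.pyGetD (pvDedupAdj vB) (-1) "" = symbol ↔ vB.getLast? = some symbol := by
      rw [PySem.List.pyGetD_neg_one _ _ hdne, ← Option.some_inj,
        ← List.getLast?_eq_some_getLast hdne, pvDedupAdj_getLast? vB]
    rw [hcont, hc, if_pos rfl, hgA, hgB]
    -- the single entry of dB at key date carries vB
    have hvals : ∀ p ∈ dB.items, p.1 = date → p.2 = vB := by
      intro p hpmem hpk
      have hm2 : (date, p.2) ∈ dB.items := by rw [← hpk]; simpa using hpmem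
      have h2 : dB.get? date = some p.2 := PySem.Dict.get?_of_mem_items _ hm2 hnd
      rw [hvB] at h2; exact (Option.some_inj.mp h2).symm
    have hval_ne : ∀ p ∈ (dB.insert date (vB ++ [symbol])).items, p.2 ≠ [] := by
      intro p hpmem
      rw [PySem.Dict.items_insert_of_contains _ _ hc] at hpmem
      obtain ⟨q, hq, hqe⟩ := List.mem_map.mp hpmem
      by_cases hqk : q.1 = date <;> simp [hqk] at hqe <;> [skip; exact hqe ▸ hne q hq]
      rw [← hqe]; simp
    have hkeys' : (dB.insert date (vB ++ [symbol])).keys.Nodup := by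
      rwa [PySem.Dict.keys_insert_of_contains _ _ hc]
    by_cases htest : vB.getLast? = some symbol
    · -- last symbol equal: A leaves its dict, B appends a duplicate that dedup removes
      rw [if_neg (by simp [hlast, htest])]
      refine ⟨?_, hval_ne, hkeys'⟩
      rw [hitems, PySem.Dict.items_insert_of_contains _ _ hc, List.map_map]
      apply List.map_congr_left
      intro p hpmem
      by_cases hpk : p.1 = date
      · simp [Function.comp, pvMapF, hpk, hvals p hpmem hpk,
          pvDedupAdj_append_singleton, htest]
      · simp [Function.comp, pvMapF, hpk]
    · -- last symbol differs: both append
      rw [if_pos (by simp [hlast, htest])]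
      refine ⟨?_, hval_ne, hkeys'⟩
      rw [PySem.Dict.items_insert_of_contains _ _ hcA,
        PySem.Dict.items_insert_of_contains _ _ hc, hitems, List.map_map, List.map_map]
      apply List.map_congr_left
      intro p hpmem
      by_cases hpk : p.1 = date
      · simp [Function.comp, pvMapF, hpk, hvals p hpmem hpk,
          pvDedupAdj_append_singleton, htest]
      · simp [Function.comp, pvMapF, hpk]
  · -- fresh date: both create the entry [symbol]
    have hc' : dB.contains date = false := by simpa using hc
    have hcA : dA.contains date = false := by rw [hcont]; exact hc'
    rw [hcont, hc']
    rw [if_neg (by simp)]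
    have hgB : dB.getD date [] = [] := PySem.Dict.getD_of_not_contains _ _ hc'
    rw [hgB, List.nil_append]
    refine ⟨?_, ?_, ?_⟩
    · rw [PySem.Dict.items_insert_of_not_contains _ _ hcA,
        PySem.Dict.items_insert_of_not_contains _ _ hc', hitems, List.map_append]
      simp [pvMapF, pvDedupAdj_singleton]
    · intro p hpmem
      rw [PySem.Dict.items_insert_of_not_contains _ _ hc'] at hpmem
      rcases List.mem_append.mp hpmem with hm | hm
      · exact hne p hm
      · simp at hm; rw [hm]; simp
    · rw [PySem.Dict.keys_insert_of_not_contains _ _ hc', List.nodup_append]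
      refine ⟨hnd, by simp, ?_⟩
      intro x hx y hy
      rw [List.mem_singleton] at hy
      subst hy
      intro heq
      subst heq
      rw [← PySem.Dict.contains_iff_mem_keys, hc'] at hx
      simp at hx

theorem pvRel_foldl (s3_prefix : String) (L : List String)
    {dA dB : PySem.Dict String (List String)} (h : pvRel dA dB)
    (hL : ∀ key ∈ L, 2 ≤ (pvParts key s3_prefix).length) :
    pvRel (L.foldl (pvStepA s3_prefix) dA) (L.foldl (pvStepB s3_prefix) dB) := by
  induction L generalizing dA dB with
  | nil => exact h
  | cons key t ih =>
    simp only [List.foldl_cons]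
    exact ih (pvRel_step s3_prefix h key (hL key (List.mem_cons_self)))
      (fun k hk => hL k (List.mem_cons_of_mem _ hk))

-- ===== VERDICT (by name: the statement is the Claim_ definition above) =====
theorem get_date_symbol_dict_spec : Claim_equal_get_date_symbol_dict := by
  intro s3_keys s3_prefix _ hpre
  unfold Spec_get_date_symbol_dict get_date_symbol_dict get_date_symbol_dict_alt
  have hrel : pvRel
      ((PySem.List.sorted s3_keys (fun x => x.toList) false).foldl (pvStepA s3_prefix) PySem.Dict.empty)
      ((PySem.List.sorted s3_keys (fun x => x.toList) false).foldl (pvStepB s3_prefix) PySem.Dict.empty) := by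
    apply pvRel_foldl
    · exact ⟨rfl, by simp [PySem.Dict.empty], by simp [PySem.Dict.empty, PySem.Dict.keys]⟩
    · intro key hk
      exact hpre key ((PySem.List.mem_sorted _ _ _ _).mp hk)
  exact hrel.1
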